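-- pv_equiv track=rewrite | github.com/lyorafelicya/15-Puzzle-solver | src/puzzleSolver.py | less
-- ===== SOURCE A (Python) =====
-- def findPosition(x, puzzle):
--     matrix = [[1,2,3,4],[5,6,7,8],[9,10,11,12],[13,14,15,16]]
--     for i in range(4):
--         for j in range(4):
--             if puzzle[i][j] == x:
--                 position = matrix[i][j]
--     return position
--
-- def less(i, puzzle):
--     # Number of tiles where j < i and position(j) > position(i)
--     count = 0
--     if (i != 16):
--         for row in range(4):
--             for col in range(4):
--                 j = puzzle[row][col]
--                 j_pos = findPosition(j,puzzle)
--                 i_pos = findPosition(i,puzzle)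
--                 if (j < i) and (j_pos > i_pos) and (j != 0):
--                     count += 1
--     else:
--         blankSpacePos = findPosition(0,puzzle)
--         count = 16 - blankSpacePos
--     return count
-- ===== SOURCE B (Python) =====
-- def less(i, puzzle):
--     # Locate the pivot's last occurrence from the right, then count tiles whose value
--     # reappears in the suffix after it -- no per-tile position computations at all.
--     flat = [puzzle[r][c] for r in range(4) for c in range(4)]
--     rev = flat[::-1]
--     if i == 16:
--         return rev.index(0)
--     after = set(flat[len(flat) - rev.index(i):])
--     return sum(1 for v in flat if v < i and v != 0 and v in after)
-- ===== Notes on version B (the rewrite author's own statement) =====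
-- stated objective: faster
-- what changed: A compares positions all-pairs, rescanning the whole grid twice (two findPosition calls) for each of the 16 cells; B never computes positions: it locates the pivot's last occurrence once from the reversed flat grid, takes the suffix after it, and counts cells whose value is in that suffix set.
import Mathlib
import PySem

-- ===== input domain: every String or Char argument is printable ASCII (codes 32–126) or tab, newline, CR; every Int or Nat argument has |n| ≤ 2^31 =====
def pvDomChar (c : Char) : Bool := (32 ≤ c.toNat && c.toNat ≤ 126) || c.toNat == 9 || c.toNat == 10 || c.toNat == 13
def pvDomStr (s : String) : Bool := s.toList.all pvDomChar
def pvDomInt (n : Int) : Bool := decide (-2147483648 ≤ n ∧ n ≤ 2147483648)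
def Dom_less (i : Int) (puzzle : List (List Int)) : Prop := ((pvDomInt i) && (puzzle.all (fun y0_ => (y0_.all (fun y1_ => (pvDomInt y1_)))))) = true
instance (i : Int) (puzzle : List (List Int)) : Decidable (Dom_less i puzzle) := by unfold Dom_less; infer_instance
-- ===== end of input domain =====

-- B drops A's all-pairs position comparisons (two full-grid findPosition scans per cell):
-- it locates the pivot once from the reversed flat grid and counts tiles whose value
-- reappears in the suffix after it (objective: faster by a constant factor).

-- ===== PORT A =====
-- matrix literal of findPosition
def pvMatrix : List (List Int) := [[1,2,3,4],[5,6,7,8],[9,10,11,12],[13,14,15,16]]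

-- findPosition: last match wins; `none` where Python raises UnboundLocalError (excluded by Pre_);
-- getD-indexing is exact because Pre_ guarantees a full 4x4 block (indices 0..3 in range)
def findPos (x : Int) (puzzle : List (List Int)) : Option Int :=
  (List.range 4).foldl (fun pos r =>
    (List.range 4).foldl (fun pos c =>
      if (puzzle.getD r []).getD c 0 == x then some ((pvMatrix.getD r []).getD c 0) else pos) pos) none

def less (i : Int) (puzzle : List (List Int)) : Int :=
  if i ≠ 16 then
    (List.range 4).foldl (fun count row =>
      (List.range 4).foldl (fun count col =>
        let j := (puzzle.getD row []).getD col 0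
        let jpos := (findPos j puzzle).getD 0
        let ipos := (findPos i puzzle).getD 0
        if j < i ∧ jpos > ipos ∧ j ≠ 0 then count + 1 else count) count) 0
  else 16 - (findPos 0 puzzle).getD 0

-- ===== PORT B =====
-- flat = [puzzle[r][c] for r in range(4) for c in range(4)]
def blockVals (puzzle : List (List Int)) : List Int :=
  (List.range 4).flatMap (fun r => (List.range 4).map (fun c => (puzzle.getD r []).getD c 0))

-- rev.index(...) raises ValueError when the tile is absent (excluded by Pre_): getD 0 is exact inside Pre_
def less_alt (i : Int) (puzzle : List (List Int)) : Int :=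
  let flat := blockVals puzzle
  let rev := flat.reverse
  if i = 16 then ((PySem.List.index? rev 0).getD 0 : Int)
  else
    let k := (PySem.List.index? rev i).getD 0
    let after := PySem.Set.ofList (PySem.List.slice flat (some ((flat.length : Int) - (k : Int))) none)
    flat.foldl (fun acc v => if v < i ∧ v ≠ 0 ∧ after.contains v then acc + 1 else acc) 0

-- ===== PRECONDITION & SPEC =====
-- Pre_ excludes exactly the inputs where the Python raises: grids without a full 4x4 block
-- (IndexError) and grids whose block misses the looked-up tile (i, or 0 when i == 16:
-- UnboundLocalError in A, ValueError in B).
def Pre_less (i : Int) (puzzle : List (List Int)) : Prop :=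
  4 ≤ puzzle.length ∧ (∀ r ∈ puzzle.take 4, 4 ≤ r.length) ∧
  (if i = 16 then (0:Int) ∈ blockVals puzzle else i ∈ blockVals puzzle)
instance (i : Int) (puzzle : List (List Int)) : Decidable (Pre_less i puzzle) := by
  unfold Pre_less; infer_instance

def pvWitness_less : Int × List (List Int) :=
  (1, [[1,2,3,4],[5,6,7,8],[9,10,11,12],[13,14,15,0]])

def Spec_less (i : Int) (puzzle : List (List Int)) (out : Int) : Prop := out = less_alt i puzzle
instance (i : Int) (puzzle : List (List Int)) (out : Int) : Decidable (Spec_less i puzzle out) := by unfold Spec_less; infer_instance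

-- ===== CLAIM (what is proved, stated in full; the proofs are below) =====
def Claim_equal_less : Prop := ∀ (i : Int) (puzzle : List (List Int)), Dom_less i puzzle → Pre_less i puzzle → Spec_less i puzzle (less i puzzle)

-- ===== LEMMAS AND PROOFS =====

-- proof-side view of findPos: a last-match fold over the enumerated flattened block
def fpL (x : Int) (L : List Int) : Option Int :=
  (PySem.List.enumerate L 1).foldl (fun acc mv => if mv.2 == x then some mv.1 else acc) none

lemma findPos_eq_fpL (x : Int) (p : List (List Int)) : findPos x p = fpL x (blockVals p) := rfl

lemma blockVals_length (p : List (List Int)) : (blockVals p).length = 16 := by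
  simp [blockVals]

-- fpAux: fpL with an arbitrary start, for the reverse induction
lemma fpAux_append (x a : Int) (L : List Int) (s : Int) :
    (PySem.List.enumerate (L ++ [a]) s).foldl (fun acc mv => if mv.2 == x then some mv.1 else acc) none
    = if a == x then some (s + L.length)
      else (PySem.List.enumerate L s).foldl (fun acc mv => if mv.2 == x then some mv.1 else acc) none := by
  rw [PySem.List.enumerate_append, List.foldl_append]
  rfl

-- last-occurrence position (1-based) = length minus first index in the reversed list
lemma fpL_eq_rev_index (x : Int) (L : List Int) :
    fpL x L = (PySem.List.index? L.reverse x).map (fun k => ((L.length - k : Nat) : Int)) := by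
  induction L using List.reverseRecOn with
  | nil => rfl
  | append_singleton L a ih =>
    unfold fpL at *
    rw [fpAux_append, List.reverse_append]
    simp only [List.reverse_singleton, List.singleton_append]
    by_cases h : a = x
    · subst h
      rw [if_pos (beq_self_eq_true a), PySem.List.index?_cons_self]
      simp
      omega
    · rw [if_neg (by simpa using h), PySem.List.index?_cons_of_ne L.reverse h, ih,
        Option.map_map]
      cases hk : PySem.List.index? L.reverse x with
      | none => simp
      | some k =>
        have : k < L.length := by
          obtain ⟨pre, suf, hL, hlen, _⟩ := (PySem.List.index?_eq_some_iff _ _ _).mp hk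
          have := congrArg List.length hL
          simp at this
          omega
        simp only [Option.map_some, Function.comp]
        congr 1
        simp [List.length_append]

lemma index?_lt_length {L : List Int} {x : Int} {k : Nat}
    (h : PySem.List.index? L x = some k) : k < L.length := by
  obtain ⟨pre, suf, hL, hlen, _⟩ := (PySem.List.index?_eq_some_iff _ _ _).mp h
  have := congrArg List.length hL
  simp at this
  omega

-- membership in the first k elements ↔ first index < k
lemma mem_take_iff_index_lt (M : List Int) (v : Int) : ∀ (k : Nat),
    v ∈ M.take k ↔ ∃ kv, PySem.List.index? M v = some kv ∧ kv < k := by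
  induction M with
  | nil => intro k; simp [PySem.List.index?_eq_idxOf?, List.idxOf?]
  | cons a M ih =>
    intro k
    cases k with
    | zero => simp
    | succ k =>
      by_cases h : a = v
      · subst h
        rw [PySem.List.index?_cons_self, List.take_succ_cons]
        simp
      · rw [PySem.List.index?_cons_of_ne M h, List.take_succ_cons]
        constructor
        · intro hv
          rcases List.mem_cons.mp hv with hv | hv
          · exact absurd hv.symm h
          · obtain ⟨kv, hkv, hlt⟩ := (ih k).mp hv
            exact ⟨kv + 1, by rw [hkv]; rfl, by omega⟩
        · rintro ⟨kv, hkv, hlt⟩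
          cases hm : PySem.List.index? M v with
          | none => rw [hm] at hkv; exact absurd hkv (by simp)
          | some m =>
            rw [hm, Option.map_some] at hkv
            have hkm : m + 1 = kv := Option.some.inj hkv
            exact List.mem_cons_of_mem _ ((ih k).mpr ⟨m, hm, by omega⟩)

-- the core equivalence of the two tests, for tiles v present in the flat grid
lemma pos_gt_iff_mem_suffix (L : List Int) (i v : Int) (hi : i ∈ L) (hv : v ∈ L) :
    ((fpL v L).getD 0 > (fpL i L).getD 0)
    ↔ v ∈ L.drop (L.length - (PySem.List.index? L.reverse i).getD 0) := by
  have hi' : i ∈ L.reverse := by simpa using hi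
  have hv' : v ∈ L.reverse := by simpa using hv
  obtain ⟨ki, hki⟩ := Option.isSome_iff_exists.mp ((PySem.List.index?_isSome_iff _ _).mpr hi')
  obtain ⟨kv, hkv⟩ := Option.isSome_iff_exists.mp ((PySem.List.index?_isSome_iff _ _).mpr hv')
  have hkiL : ki < L.length := by have := index?_lt_length hki; simpa using this
  have hkvL : kv < L.length := by have := index?_lt_length hkv; simpa using this
  rw [fpL_eq_rev_index, fpL_eq_rev_index, hki, hkv]
  have hdrop : L.drop (L.length - ki) = (L.reverse.take ki).reverse := by
    rw [List.reverse_take, List.reverse_reverse, List.length_reverse]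
  simp only [Option.map_some, Option.getD_some, hdrop, List.mem_reverse,
    mem_take_iff_index_lt, hkv]
  constructor
  · intro h
    refine ⟨kv, rfl, ?_⟩
    have h1 : ((L.length - kv : Nat) : Int) = (L.length : Int) - kv := by
      push_cast [Nat.cast_sub (le_of_lt hkvL)]; ring
    have h2 : ((L.length - ki : Nat) : Int) = (L.length : Int) - ki := by
      push_cast [Nat.cast_sub (le_of_lt hkiL)]; ring
    rw [h1, h2] at h
    omega
  · rintro ⟨k', hk', hlt⟩
    have hk'' : kv = k' := Option.some.inj hk'
    subst hk''
    have h1 : ((L.length - kv : Nat) : Int) = (L.length : Int) - kv := by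
      push_cast [Nat.cast_sub (le_of_lt hkvL)]; ring
    have h2 : ((L.length - ki : Nat) : Int) = (L.length : Int) - ki := by
      push_cast [Nat.cast_sub (le_of_lt hkiL)]; ring
    rw [h1, h2]
    omega

set_option maxHeartbeats 4000000 in
lemma less_of_ne (i : Int) (p : List (List Int)) (h : i ≠ 16) :
    less i p = (blockVals p).foldl
      (fun count v =>
        if v < i ∧ (fpL v (blockVals p)).getD 0 > (fpL i (blockVals p)).getD 0 ∧ v ≠ 0
        then count + 1 else count) 0 := by
  unfold less
  rw [if_pos h]
  rfl

lemma less_alt_of_ne (i : Int) (p : List (List Int)) (h : i ≠ 16) :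
    less_alt i p = (blockVals p).foldl
      (fun acc v => if v < i ∧ v ≠ 0 ∧
          (PySem.Set.ofList (PySem.List.slice (blockVals p)
            (some (((blockVals p).length : Int)
              - ((PySem.List.index? (blockVals p).reverse i).getD 0 : Int))) none)).contains v
        then acc + 1 else acc) 0 := by
  unfold less_alt
  rw [if_neg h]

lemma less_alt_16 (p : List (List Int)) :
    less_alt 16 p = ((PySem.List.index? (blockVals p).reverse 0).getD 0 : Int) := by
  unfold less_alt
  rw [if_pos rfl]

-- ===== VERDICT (by name: the statement is the Claim_ definition above) =====
theorem less_spec : Claim_equal_less := by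
  intro i puzzle hdom hpre
  unfold Spec_less
  obtain ⟨h1, h2, h3⟩ := hpre
  by_cases h16 : i = 16
  · subst h16
    rw [if_pos rfl] at h3
    rw [less_alt_16, less, if_neg (by simp), findPos_eq_fpL, fpL_eq_rev_index]
    obtain ⟨k0, hk0⟩ := Option.isSome_iff_exists.mp
      ((PySem.List.index?_isSome_iff (blockVals puzzle).reverse 0).mpr (List.mem_reverse.mpr h3))
    have hk0L : k0 < 16 := by
      have := index?_lt_length hk0
      rw [List.length_reverse, blockVals_length] at this
      exact this
    rw [hk0]
    simp only [Option.map_some, Option.getD_some, blockVals_length]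
    push_cast [Nat.cast_sub (le_of_lt hk0L)]
    omega
  · rw [if_neg h16] at h3
    rw [less_of_ne i puzzle h16, less_alt_of_ne i puzzle h16]
    obtain ⟨ki, hki⟩ := Option.isSome_iff_exists.mp
      ((PySem.List.index?_isSome_iff (blockVals puzzle).reverse i).mpr (List.mem_reverse.mpr h3))
    have hkiL : ki < (blockVals puzzle).length := by
      have := index?_lt_length hki
      rwa [List.length_reverse] at this
    have hslice : PySem.List.slice (blockVals puzzle)
        (some (((blockVals puzzle).length : Int)
          - ((PySem.List.index? (blockVals puzzle).reverse i).getD 0 : Int))) none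
        = (blockVals puzzle).drop ((blockVals puzzle).length
            - (PySem.List.index? (blockVals puzzle).reverse i).getD 0) := by
      rw [hki]
      simp only [Option.getD_some]
      rw [PySem.List.slice_from _ (by omega)]
      congr 1
      omega
    rw [hslice]
    rw [PySem.List.foldl_ite_add_one
      (fun v : Int => v < i ∧ (fpL v (blockVals puzzle)).getD 0 > (fpL i (blockVals puzzle)).getD 0 ∧ v ≠ 0) _ 0,
      PySem.List.foldl_ite_add_one
      (fun v : Int => v < i ∧ v ≠ 0 ∧ (PySem.Set.ofList ((blockVals puzzle).drop ((blockVals puzzle).length - (PySem.List.index? (blockVals puzzle).reverse i).getD 0))).contains v = true) _ 0,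
      zero_add, zero_add]
    congr 1
    apply List.countP_congr
    intro v hv
    have hmem : (PySem.Set.ofList ((blockVals puzzle).drop ((blockVals puzzle).length - (PySem.List.index? (blockVals puzzle).reverse i).getD 0))).contains v = true
        ↔ v ∈ (blockVals puzzle).drop ((blockVals puzzle).length - (PySem.List.index? (blockVals puzzle).reverse i).getD 0) := by
      simp [PySem.Set.contains, PySem.Set.mem_ofList]
    have hpos := pos_gt_iff_mem_suffix (blockVals puzzle) i v h3 hv
    by_cases h1' : v < i <;> by_cases h2' : v = 0 <;>
      simp [h1', h2', hmem, hpos]
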